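-- pv_equiv track=rewrite | github.com/jroth1111/public-published-skills | skills/codebase-map/scripts/packer/digest_core.py | package_stats
-- ===== SOURCE A (Python) =====
-- from typing import Any, Dict, Iterable, List, Optional, Set, Tuple
--
-- def package_stats(
--     files: Dict[str, Dict],
--     symbols: Dict[str, Dict],
--     packages: List[Dict[str, object]],
-- ) -> List[Tuple[str, int, int]]:
--     package_roots = [pkg.get("path", "") for pkg in packages if pkg.get("path") not in {".", ""}]
--     if not package_roots:
--         package_roots = [pkg.get("path", "") for pkg in packages if pkg.get("path")]
--     package_roots = [root for root in package_roots if root]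
--     if not package_roots:
--         return []
--     roots_sorted = sorted(package_roots, key=len, reverse=True)
--     stats: Dict[str, Dict[str, int]] = {root: {"files": 0, "symbols": 0} for root in roots_sorted}
--
--     def root_for_path(path: str) -> Optional[str]:
--         for root in roots_sorted:
--             if path == root or path.startswith(root + "/"):
--                 return root
--         return None
--
--     for node in files.values():
--         path = node.get("path", "")
--         root = root_for_path(path)
--         if root:
--             stats[root]["files"] += 1
--     for sym in symbols.values():
--         path = sym.get("defined_in", {}).get("path", "")
--         root = root_for_path(path)
--         if root:
--             stats[root]["symbols"] += 1
--
--     ranked = sorted(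
--         [(root, data["files"], data["symbols"]) for root, data in stats.items()],
--         key=lambda item: (-item[1], -item[2], item[0]),
--     )
--     return ranked
-- ===== SOURCE B (Python) =====
-- def package_stats(files, symbols, packages):
--     roots = [p.get("path", "") for p in packages if p.get("path") not in {".", ""}]
--     if not roots:
--         roots = [p.get("path", "") for p in packages if p.get("path")]
--     roots = [r for r in roots if r]
--     if not roots:
--         return []
--
--     # trie over '/'-components; a terminal node stores its root string under None
--     trie = {}
--     for r in roots:
--         node = trie
--         for comp in r.split("/"):
--             node = node.setdefault(comp, {})
--         node[None] = r
--
--     def deepest(path):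
--         node, best = trie, None
--         for comp in path.split("/"):
--             if comp not in node:
--                 break
--             node = node[comp]
--             if None in node:
--                 best = node[None]
--         return best
--
--     fcount, scount = {}, {}
--     for node in files.values():
--         r = deepest(node.get("path", ""))
--         if r is not None:
--             fcount[r] = fcount.get(r, 0) + 1
--     for sym in symbols.values():
--         r = deepest(sym.get("defined_in", {}).get("path", ""))
--         if r is not None:
--             scount[r] = scount.get(r, 0) + 1
--
--     return sorted(
--         ((r, fcount.get(r, 0), scount.get(r, 0)) for r in dict.fromkeys(roots)),
--         key=lambda t: (-t[1], -t[2], t[0]),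
--     )
-- ===== Notes on version B (the rewrite author's own statement) =====
-- stated objective: alternative
-- what changed: The per-path linear scan over all length-sorted roots (with a startswith test each) is replaced by a '/'-component trie built once from the roots: each path is split and walked down the trie once, the deepest marked node giving the owning root; counts go into per-root counter dicts and the same (-files,-symbols,root) ranking is applied.
import Mathlib
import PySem

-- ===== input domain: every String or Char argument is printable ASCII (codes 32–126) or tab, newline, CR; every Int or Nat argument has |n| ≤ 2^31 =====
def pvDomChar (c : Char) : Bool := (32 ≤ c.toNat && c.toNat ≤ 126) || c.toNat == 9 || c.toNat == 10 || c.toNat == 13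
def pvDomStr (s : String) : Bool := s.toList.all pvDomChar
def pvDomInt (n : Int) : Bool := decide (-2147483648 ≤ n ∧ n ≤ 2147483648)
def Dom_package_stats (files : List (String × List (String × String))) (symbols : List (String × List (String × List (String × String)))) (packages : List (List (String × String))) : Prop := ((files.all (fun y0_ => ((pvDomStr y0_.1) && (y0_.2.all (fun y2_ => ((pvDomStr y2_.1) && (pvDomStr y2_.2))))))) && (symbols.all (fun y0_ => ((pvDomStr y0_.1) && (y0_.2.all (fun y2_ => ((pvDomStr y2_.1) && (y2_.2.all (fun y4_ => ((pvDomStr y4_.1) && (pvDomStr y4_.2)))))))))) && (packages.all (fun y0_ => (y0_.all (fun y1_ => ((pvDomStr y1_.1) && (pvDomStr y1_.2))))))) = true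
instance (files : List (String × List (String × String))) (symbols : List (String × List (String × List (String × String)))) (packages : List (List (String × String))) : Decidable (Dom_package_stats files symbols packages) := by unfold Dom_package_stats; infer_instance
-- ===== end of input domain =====

-- B replaces A's per-path scan over all length-sorted roots by a '/'-component trie walked once per
-- path (objective: alternative); same preprocessing and identical (-files, -symbols, root) ranking.

-- ===== PORT A =====

-- package_roots preprocessing (the three comprehensions of A, in order)
def psA_roots (packages : List (List (String × String))) : List String :=
  let r1 := (packages.filter (fun pkg =>
      match (PySem.Dict.mk pkg).get? "path" with
      | some s => !(s == "." || s == "")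
      | none => true)).map (fun pkg => (PySem.Dict.mk pkg).getD "path" "")
  let r2 := if r1.isEmpty then
      (packages.filter (fun pkg =>
        match (PySem.Dict.mk pkg).get? "path" with
        | some s => !(s == "")
        | none => false)).map (fun pkg => (PySem.Dict.mk pkg).getD "path" "")
    else r1
  r2.filter (fun r => !(r == ""))

-- 'path == root or path.startswith(root + "/")' (string work done on the char-list side)
def psA_matches (root path : String) : Bool :=
  path == root || PySem.Chars.startswith path.toList (root.toList ++ ['/'])

-- root_for_path: first match in the length-descending root list
def psA_rootFor (rootsSorted : List String) (path : String) : Option String :=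
  match rootsSorted with
  | [] => none
  | r :: rest => if psA_matches r path then some r else psA_rootFor rest path

-- body of A's two counting loops: 'root = root_for_path(path); if root: stats[root][field] += 1'
def psA_bump (field : String) (rootsSorted : List String)
    (st : PySem.Dict String (PySem.Dict String Int)) (path : String) :
    PySem.Dict String (PySem.Dict String Int) :=
  match psA_rootFor rootsSorted path with
  | some root => if root == "" then st
      else st.modify root PySem.Dict.empty (fun inner => inner.modify field 0 (· + 1))
  | none => st

def package_stats (files : List (String × List (String × String))) (symbols : List (String × List (String × List (String × String)))) (packages : List (List (String × String))) : List (String × Int × Int) :=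
  let roots := psA_roots packages
  if roots.isEmpty then [] else
  let rootsSorted := PySem.List.sorted roots (fun r => PySem.Str.len r) true
  let stats0 : PySem.Dict String (PySem.Dict String Int) :=
    rootsSorted.foldl
      (fun d root => d.insert root (PySem.Dict.mk [("files", 0), ("symbols", 0)]))
      PySem.Dict.empty
  let stats1 := files.foldl
      (fun st e => psA_bump "files" rootsSorted st ((PySem.Dict.mk e.2).getD "path" "")) stats0
  let stats2 := symbols.foldl
      (fun st e => psA_bump "symbols" rootsSorted st
        ((PySem.Dict.mk ((PySem.Dict.mk e.2).getD "defined_in" [])).getD "path" "")) stats1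
  PySem.List.sorted
    (stats2.items.map (fun p => (p.1, p.2.getD "files" 0, p.2.getD "symbols" 0)))
    (fun t => toLex (-t.2.1, toLex (-t.2.2, t.1))) false

-- ===== PORT B =====

-- trie over '/'-components: a node is (optional root marker, children assoc list)
mutual
inductive PTrie where
  | mk : Option String → PKids → PTrie
inductive PKids where
  | nil : PKids
  | cons : List Char → PTrie → PKids → PKids
end

def psB_kidsGet? : PKids → List Char → Option PTrie
  | .nil, _ => none
  | .cons k t rest, c => if k = c then some t else psB_kidsGet? rest c

def psB_kidsSet : PKids → List Char → PTrie → PKids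
  | .nil, c, t => .cons c t .nil
  | .cons k u rest, c, t => if k = c then .cons k t rest else .cons k u (psB_kidsSet rest c t)

-- insert a root along its component list, marking the terminal node
def psB_insert : PTrie → List (List Char) → String → PTrie
  | .mk _ kids, [], r => .mk (some r) kids
  | .mk m kids, c :: cs, r =>
      .mk m (psB_kidsSet kids c
        (psB_insert ((psB_kidsGet? kids c).getD (.mk none .nil)) cs r))

-- 'deepest': walk the path's components, remembering the deepest marker seen
def psB_descend : PTrie → List (List Char) → Option String → Option String
  | _, [], best => best
  | .mk _ kids, c :: cs, best =>
      match psB_kidsGet? kids c with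
      | none => best
      | some (.mk m kids') =>
          psB_descend (.mk m kids') cs (match m with | some r => some r | none => best)

def psB_split (s : String) : List (List Char) := PySem.Chars.splitOn s.toList ['/']

def psB_trie (roots : List String) : PTrie :=
  roots.foldl (fun t r => psB_insert t (psB_split r) r) (.mk none .nil)

def psB_deepest (t : PTrie) (path : String) : Option String :=
  psB_descend t (psB_split path) none

-- same package_roots preprocessing as A (Source B repeats those lines verbatim)
def psB_roots (packages : List (List (String × String))) : List String :=
  let r1 := (packages.filter (fun pkg =>
      match (PySem.Dict.mk pkg).get? "path" with
      | some s => !(s == "." || s == "")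
      | none => true)).map (fun pkg => (PySem.Dict.mk pkg).getD "path" "")
  let r2 := if r1.isEmpty then
      (packages.filter (fun pkg =>
        match (PySem.Dict.mk pkg).get? "path" with
        | some s => !(s == "")
        | none => false)).map (fun pkg => (PySem.Dict.mk pkg).getD "path" "")
    else r1
  r2.filter (fun r => !(r == ""))

-- 'r = deepest(path); if r is not None: count[r] = count.get(r, 0) + 1'
def psB_bump (t : PTrie) (d : PySem.Dict String Int) (path : String) : PySem.Dict String Int :=
  match psB_deepest t path with
  | some r => d.insert r (d.getD r 0 + 1)
  | none => d

def package_stats_alt (files : List (String × List (String × String))) (symbols : List (String × List (String × List (String × String)))) (packages : List (List (String × String))) : List (String × Int × Int) :=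
  let roots := psB_roots packages
  if roots.isEmpty then [] else
  let trie := psB_trie roots
  let fcount : PySem.Dict String Int := files.foldl
      (fun d e => psB_bump trie d ((PySem.Dict.mk e.2).getD "path" "")) PySem.Dict.empty
  let scount : PySem.Dict String Int := symbols.foldl
      (fun d e => psB_bump trie d
        ((PySem.Dict.mk ((PySem.Dict.mk e.2).getD "defined_in" [])).getD "path" "")) PySem.Dict.empty
  PySem.List.sorted
    ((PySem.List.dedup roots).map (fun r => (r, fcount.getD r 0, scount.getD r 0)))
    (fun t => toLex (-t.2.1, toLex (-t.2.2, t.1))) false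

-- ===== PRECONDITION & SPEC =====
def Spec_package_stats (files : List (String × List (String × String))) (symbols : List (String × List (String × List (String × String)))) (packages : List (List (String × String))) (out : List (String × Int × Int)) : Prop := out = package_stats_alt files symbols packages
instance (files : List (String × List (String × String))) (symbols : List (String × List (String × List (String × String)))) (packages : List (List (String × String))) (out : List (String × Int × Int)) : Decidable (Spec_package_stats files symbols packages out) := by unfold Spec_package_stats; infer_instance

-- ===== CLAIM (what is proved, stated in full; the proofs are below) =====
def Claim_equal_package_stats : Prop := ∀ (files : List (String × List (String × String))) (symbols : List (String × List (String × List (String × String)))) (packages : List (List (String × String))), Dom_package_stats files symbols packages → Spec_package_stats files symbols packages (package_stats files symbols packages)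

-- ===== LEMMAS AND PROOFS =====

-- ---- a clean recursive model of s.split('/') ----
def pvSplit : List Char → List (List Char)
  | [] => [[]]
  | c :: rest =>
      if c = '/' then [] :: pvSplit rest
      else match pvSplit rest with
        | [] => [[c]]
        | h :: t => (c :: h) :: t

def pvJoin : List (List Char) → List Char
  | [] => []
  | [h] => h
  | h :: t => h ++ '/' :: pvJoin t

theorem pvSplit_ne_nil (s : List Char) : pvSplit s ≠ [] := by
    induction s with
  | nil => simp [pvSplit]
  | cons c rest ih =>
    simp only [pvSplit]
    split
    · simp
    · split <;> simp_all

theorem splitOn_go_eq (fuel : Nat) (s cur : List Char) (acc : List (List Char))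
    (h : s.length ≤ fuel) :
    PySem.Chars.splitOn.go ['/'] fuel s cur acc =
      acc.reverse ++ (match pvSplit s with
        | [] => []
        | h :: t => (cur.reverse ++ h) :: t) := by
  induction fuel generalizing s cur acc with
  | zero =>
    have hs : s = [] := List.eq_nil_of_length_eq_zero (Nat.le_zero.mp h)
    subst hs
    simp [PySem.Chars.splitOn.go, pvSplit]
  | succ fuel ih =>
    cases s with
    | nil => simp [PySem.Chars.splitOn.go, pvSplit]
    | cons c rest =>
      obtain ⟨hh, ht, hsp⟩ : ∃ hh ht, pvSplit rest = hh :: ht := by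
        cases hps : pvSplit rest with
        | nil => exact absurd hps (pvSplit_ne_nil rest)
        | cons x y => exact ⟨x, y, rfl⟩
      have hlen : rest.length ≤ fuel := by simpa using Nat.succ_le_succ_iff.mp (by simpa using h)
      by_cases hc : c = '/'
      · subst hc
        rw [PySem.Chars.splitOn.go]
        simp only [List.isPrefixOf, BEq.rfl, Bool.true_and, if_true]
        have hd : List.drop (['/'] : List Char).length ('/' :: rest) = rest := rfl
        rw [hd, ih rest [] (cur.reverse :: acc) hlen]
        simp [pvSplit, hsp]
      · rw [PySem.Chars.splitOn.go]
        have : (['/'].isPrefixOf (c :: rest)) = false := by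
          simp [List.isPrefixOf]
          exact fun hcc => absurd hcc.symm hc
        rw [this]
        simp only [if_false, Bool.false_eq_true]
        rw [ih rest (c :: cur) acc hlen]
        simp [pvSplit, hc, hsp, List.append_assoc]

theorem splitOn_eq_pvSplit (s : List Char) : PySem.Chars.splitOn s ['/'] = pvSplit s := by
  show PySem.Chars.splitOn.go ['/'] (s.length + 1) s [] [] = pvSplit s
  rw [splitOn_go_eq (s.length + 1) s [] [] (Nat.le_succ _)]
  obtain ⟨hh, ht, hsp⟩ : ∃ hh ht, pvSplit s = hh :: ht := by
    cases hps : pvSplit s with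
    | nil => exact absurd hps (pvSplit_ne_nil s)
    | cons x y => exact ⟨x, y, rfl⟩
  simp [hsp]

theorem pvSplit_append (a b : List Char) : pvSplit (a ++ '/' :: b) = pvSplit a ++ pvSplit b := by
  induction a with
  | nil => simp [pvSplit]
  | cons c a' ih =>
    by_cases hc : c = '/'
    · subst hc; simp [pvSplit, ih]
    · obtain ⟨hh, ht, hsp⟩ : ∃ hh ht, pvSplit a' = hh :: ht := by
        cases hps : pvSplit a' with
        | nil => exact absurd hps (pvSplit_ne_nil a')
        | cons x y => exact ⟨x, y, rfl⟩
      simp [pvSplit, hc, ih, hsp]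

theorem pvJoin_pvSplit (s : List Char) : pvJoin (pvSplit s) = s := by
  induction s with
  | nil => rfl
  | cons c rest ih =>
    obtain ⟨hh, ht, hsp⟩ : ∃ hh ht, pvSplit rest = hh :: ht := by
      cases hps : pvSplit rest with
      | nil => exact absurd hps (pvSplit_ne_nil rest)
      | cons x y => exact ⟨x, y, rfl⟩
    by_cases hc : c = '/'
    · subst hc
      simp only [pvSplit, if_true, hsp] at *
      cases ht with
      | nil => simp [pvJoin] at ih ⊢; simp [ih]
      | cons u v => simp [pvJoin] at ih ⊢; simp [ih]
    · simp only [pvSplit, hc, if_false, hsp] at *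
      cases ht with
      | nil => simp [pvJoin] at ih ⊢; simp [ih]
      | cons u v => simp [pvJoin] at ih ⊢; simp [ih]

theorem pvJoin_append (as bs : List (List Char)) (ha : as ≠ []) (hb : bs ≠ []) :
    pvJoin (as ++ bs) = pvJoin as ++ '/' :: pvJoin bs := by
  induction as with
  | nil => exact absurd rfl ha
  | cons a as' ih =>
    cases as' with
    | nil =>
      cases bs with
      | nil => exact absurd rfl hb
      | cons b bs' => simp [pvJoin]
    | cons a2 as2 =>
      have h1 : pvJoin ((a2 :: as2) ++ bs) = pvJoin (a2 :: as2) ++ '/' :: pvJoin bs :=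
        ih (by simp) 
      have hcons : ∀ (x : List Char) (l : List (List Char)), l ≠ [] →
          pvJoin (x :: l) = x ++ '/' :: pvJoin l := by
        intro x l hl
        cases l with
        | nil => exact absurd rfl hl
        | cons y ys => rfl
      rw [List.cons_append, hcons a ((a2 :: as2) ++ bs) (by simp), h1,
        hcons a (a2 :: as2) (by simp)]
      simp

theorem pvSplit_inj {a b : List Char} (h : pvSplit a = pvSplit b) : a = b := by
  have := congrArg pvJoin h
  rwa [pvJoin_pvSplit, pvJoin_pvSplit] at this

-- proper split-prefix means char-level extension by '/'
theorem split_prefix_cases {a b : List Char} (h : pvSplit a <+: pvSplit b) :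
    a = b ∨ ∃ q, b = a ++ '/' :: q := by
  obtain ⟨q, hq⟩ := h
  cases q with
  | nil =>
    left
    exact pvSplit_inj (by simpa using hq)
  | cons u v =>
    right
    refine ⟨pvJoin (u :: v), ?_⟩
    have hb := pvJoin_pvSplit b
    rw [← hq, pvJoin_append (pvSplit a) (u :: v) (pvSplit_ne_nil a) (by simp),
      pvJoin_pvSplit] at hb
    exact hb.symm

theorem eq_of_split_prefix_len {a b : List Char} (h : pvSplit a <+: pvSplit b)
    (hl : b.length ≤ a.length) : a = b := by
  rcases split_prefix_cases h with rfl | ⟨q, rfl⟩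
  · rfl
  · simp at hl

-- A's match test is exactly component-prefix
theorem matches_iff (r p : String) :
    psA_matches r p = true ↔ pvSplit r.toList <+: pvSplit p.toList := by
  unfold psA_matches
  rw [Bool.or_eq_true, beq_iff_eq, PySem.Chars.startswith_iff]
  constructor
  · rintro (rfl | ⟨t, ht⟩)
    · exact List.prefix_refl _
    · have : p.toList = r.toList ++ '/' :: t := by
        rw [← ht]; simp
      rw [this, pvSplit_append]
      exact List.prefix_append _ _
  · intro h
    rcases split_prefix_cases h with heq | ⟨q, hq⟩
    · exact Or.inl (String.toList_inj.mp heq).symm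
    · right
      refine ⟨q, ?_⟩
      rw [hq]; simp

-- ---- trie lemmas ----
theorem kidsGet?_set_self : ∀ (ks : PKids) (c : List Char) (t : PTrie),
    psB_kidsGet? (psB_kidsSet ks c t) c = some t
  | .nil, c, t => by simp [psB_kidsGet?, psB_kidsSet]
  | .cons k u rest, c, t => by
    simp only [psB_kidsSet]
    by_cases h : k = c
    · subst h; simp [psB_kidsGet?]
    · simp [psB_kidsGet?, h, kidsGet?_set_self rest c t]

theorem kidsGet?_set_ne : ∀ (ks : PKids) (c c' : List Char) (t : PTrie), c' ≠ c →
    psB_kidsGet? (psB_kidsSet ks c t) c' = psB_kidsGet? ks c'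
  | .nil, c, c', t, h => by simp [psB_kidsGet?, psB_kidsSet, Ne.symm h]
  | .cons k u rest, c, c', t, h => by
    simp only [psB_kidsSet]
    by_cases hk : k = c
    · subst hk
      simp [psB_kidsGet?, Ne.symm h]
    · by_cases hk' : k = c'
      · subst hk'; simp [psB_kidsGet?, hk]
      · simp [psB_kidsGet?, hk, hk', kidsGet?_set_ne rest c c' t h]

-- exact lookup: descend exactly cs and read the marker
def pvLookupM : PTrie → List (List Char) → Option String
  | .mk m _, [] => m
  | .mk _ kids, c :: cs =>
      match psB_kidsGet? kids c with
      | none => none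
      | some t => pvLookupM t cs

theorem pvLookupM_empty (cs : List (List Char)) : pvLookupM (.mk none .nil) cs = none := by
  cases cs with
  | nil => rfl
  | cons c cs' => simp [pvLookupM, psB_kidsGet?]

theorem pvLookupM_insert (t : PTrie) (cs ds : List (List Char)) (r : String) :
    pvLookupM (psB_insert t cs r) ds = if ds = cs then some r else pvLookupM t ds := by
  induction cs generalizing t ds with
  | nil =>
    cases t with
    | mk m kids =>
      cases ds with
      | nil => simp [psB_insert, pvLookupM]
      | cons d ds' => simp [psB_insert, pvLookupM]
  | cons c cs' ih =>
    cases t with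
    | mk m kids =>
      cases ds with
      | nil => simp [psB_insert, pvLookupM]
      | cons d ds' =>
        by_cases hd : d = c
        · subst hd
          simp only [psB_insert, pvLookupM, kidsGet?_set_self]
          cases hg : psB_kidsGet? kids d with
          | none =>
            rw [ih]
            simp [pvLookupM_empty]
          | some u =>
            rw [ih]
            simp
        · simp only [psB_insert, pvLookupM, kidsGet?_set_ne _ _ _ _ hd]
          have : (d :: ds' = c :: cs') = False := by simp [hd]
          simp [this]

theorem psB_split_eq (s : String) : psB_split s = pvSplit s.toList :=
  splitOn_eq_pvSplit s.toList

theorem pvLookupM_foldl (R : List String) (t : PTrie) (cs : List (List Char)) :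
    pvLookupM (R.foldl (fun t r => psB_insert t (psB_split r) r) t) cs =
      match R.reverse.find? (fun r => decide (pvSplit r.toList = cs)) with
      | some r => some r
      | none => pvLookupM t cs := by
  induction R generalizing t with
  | nil => simp
  | cons r0 R' ih =>
    simp only [List.foldl_cons, List.reverse_cons, List.find?_append, ih]
    cases hf : R'.reverse.find? (fun r => decide (pvSplit r.toList = cs)) with
    | some r => simp
    | none =>
      simp only [Option.none_or]
      rw [pvLookupM_insert, psB_split_eq]
      cases hr0 : (decide (pvSplit r0.toList = cs)) with
      | true =>
        have : cs = pvSplit r0.toList := (of_decide_eq_true hr0).symm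
        simp [List.find?, this]
      | false =>
        have : ¬ (cs = pvSplit r0.toList) := fun hcc => by
          simp [hcc] at hr0
        simp [List.find?, hr0, this]

theorem pvLookupM_trie (R : List String) (cs : List (List Char)) :
    pvLookupM (psB_trie R) cs =
      R.reverse.find? (fun r => decide (pvSplit r.toList = cs)) := by
  unfold psB_trie
  rw [pvLookupM_foldl]
  cases hf : R.reverse.find? (fun r => decide (pvSplit r.toList = cs)) with
  | some r => simp
  | none => simp [pvLookupM_empty]

-- nonempty prefixes, shortest first
def pvPrefixes : List (List Char) → List (List (List Char))
  | [] => []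
  | c :: cs => [c] :: (pvPrefixes cs).map (c :: ·)

theorem mem_pvPrefixes {q : List (List Char)} {cs : List (List Char)} :
    q ∈ pvPrefixes cs ↔ q ≠ [] ∧ q <+: cs := by
  induction cs generalizing q with
  | nil => simp [pvPrefixes, List.prefix_nil]
  | cons c cs' ih =>
    simp only [pvPrefixes, List.mem_cons, List.mem_map]
    constructor
    · rintro (rfl | ⟨q', hq', rfl⟩)
      · exact ⟨by simp, ⟨cs', rfl⟩⟩
      · obtain ⟨hne, hpre⟩ := ih.mp hq'
        exact ⟨by simp, List.cons_prefix_cons.mpr ⟨rfl, hpre⟩⟩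
    · rintro ⟨hne, hpre⟩
      cases q with
      | nil => exact absurd rfl hne
      | cons x q' =>
        obtain ⟨rfl, hpre'⟩ := List.cons_prefix_cons.mp hpre
        cases q' with
        | nil => exact Or.inl rfl
        | cons y q'' =>
          exact Or.inr ⟨y :: q'', ih.mpr ⟨by simp, hpre'⟩, rfl⟩

theorem pvPrefixes_pairwise (cs : List (List Char)) :
    (pvPrefixes cs).Pairwise (fun a b => a <+: b) := by
  induction cs with
  | nil => simp [pvPrefixes]
  | cons c cs' ih =>
    simp only [pvPrefixes]
    constructor
    · intro b hb
      obtain ⟨q', hq', rfl⟩ := List.mem_map.mp hb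
      exact List.cons_prefix_cons.mpr ⟨rfl, List.nil_prefix⟩
    · rw [List.pairwise_map]
      exact ih.imp (fun h => List.cons_prefix_cons.mpr ⟨rfl, h⟩)

theorem descend_eq_fold (t : PTrie) (cs : List (List Char)) (best : Option String) :
    psB_descend t cs best =
      (pvPrefixes cs).foldl
        (fun b q => match pvLookupM t q with | some r => some r | none => b) best := by
  induction cs generalizing t best with
  | nil => simp [psB_descend, pvPrefixes]
  | cons c cs' ih =>
    cases t with
    | mk m kids =>
      simp only [pvPrefixes, List.foldl_cons]
      cases hg : psB_kidsGet? kids c with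
      | none =>
        have h1 : pvLookupM (PTrie.mk m kids) [c] = none := by
          simp [pvLookupM, hg]
        rw [psB_descend]
        simp only [hg, h1, List.foldl_map]
        have hcongr := PySem.List.foldl_congr_mem
          (l := pvPrefixes cs') (init := best)
          (f := fun x q => match pvLookupM (PTrie.mk m kids) (c :: q) with
            | some r => some r | none => x)
          (g := fun x _ => x)
          (by intro acc q hq; simp [pvLookupM, hg])
        rw [hcongr, PySem.List.foldl_ignore]
      | some u =>
        cases u with
        | mk m' kids' =>
          have h1 : pvLookupM (PTrie.mk m kids) [c] = m' := by
            simp [pvLookupM, hg]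
          rw [psB_descend]
          cases m' with
          | none =>
            simp only [hg, h1, List.foldl_map]
            have hcongr := PySem.List.foldl_congr_mem
              (l := pvPrefixes cs') (init := best)
              (f := fun x q => match pvLookupM (PTrie.mk m kids) (c :: q) with
                | some r => some r | none => x)
              (g := fun x q => match pvLookupM (PTrie.mk none kids') q with
                | some r => some r | none => x)
              (by intro acc q hq; simp [pvLookupM, hg])
            rw [hcongr, ← ih]
          | some r0 =>
            simp only [hg, h1, List.foldl_map]
            have hcongr := PySem.List.foldl_congr_mem
              (l := pvPrefixes cs') (init := some r0)
              (f := fun x q => match pvLookupM (PTrie.mk m kids) (c :: q) with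
                | some r => some r | none => x)
              (g := fun x q => match pvLookupM (PTrie.mk (some r0) kids') q with
                | some r => some r | none => x)
              (by intro acc q hq; simp [pvLookupM, hg])
            rw [hcongr, ← ih]

theorem fold_hit_getLast (g : List (List Char) → Option String) (P : List (List (List Char)))
    (b : Option String) :
    P.foldl (fun b q => match g q with | some r => some r | none => b) b =
      match (P.filter (fun q => (g q).isSome)).getLast? with
      | some q => g q
      | none => b := by
  induction P generalizing b with
  | nil => rfl
  | cons q P' ih =>
    simp only [List.foldl_cons, List.filter_cons]
    cases hgq : (g q).isSome with
    | false =>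
      have hstep : (match g q with | some r => some r | none => b) = b := by
        cases hv : g q with
        | none => rfl
        | some r => rw [hv] at hgq; simp at hgq
      simp only [Bool.false_eq_true, if_false, hstep, ih]
    | true =>
      obtain ⟨r, hr⟩ := Option.isSome_iff_exists.mp hgq
      simp only [if_true, ih]
      have : (q :: P'.filter (fun q => (g q).isSome)) =
          [q] ++ P'.filter (fun q => (g q).isSome) := rfl
      rw [this, List.getLast?_append]
      cases hl : (P'.filter (fun q => (g q).isSome)).getLast? with
      | none => simp [hr]
      | some q' => simp

theorem rootFor_mem {RS : List String} {p : String} {r : String}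
    (h : psA_rootFor RS p = some r) : r ∈ RS ∧ psA_matches r p = true := by
  induction RS with
  | nil => simp [psA_rootFor] at h
  | cons r0 rest ih =>
    simp only [psA_rootFor] at h
    by_cases hm : psA_matches r0 p
    · rw [if_pos hm] at h
      cases h
      exact ⟨List.mem_cons_self, hm⟩
    · rw [if_neg hm] at h
      obtain ⟨h1, h2⟩ := ih h
      exact ⟨List.mem_cons_of_mem _ h1, h2⟩

theorem rootFor_none (RS : List String) (p : String) :
    psA_rootFor RS p = none ↔ ∀ x ∈ RS, psA_matches x p = false := by
  induction RS with
  | nil => simp [psA_rootFor]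
  | cons r0 rest ih =>
    simp only [psA_rootFor]
    by_cases hm : psA_matches r0 p
    · simp [hm]
    · simp only [if_neg hm, ih, List.mem_cons]
      constructor
      · rintro h x (rfl | hx)
        · exact Bool.not_eq_true _ ▸ (by simpa using hm)
        · exact h x hx
      · intro h x hx
        exact h x (Or.inr hx)

theorem rootFor_max (RS : List String) (p : String) (r : String)
    (hpw : RS.Pairwise (fun a b => PySem.Str.len b ≤ PySem.Str.len a))
    (h : psA_rootFor RS p = some r) :
    ∀ x ∈ RS, psA_matches x p = true → PySem.Str.len x ≤ PySem.Str.len r := by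
  induction RS with
  | nil => simp [psA_rootFor] at h
  | cons r0 rest ih =>
    obtain ⟨h0, hrest⟩ := List.pairwise_cons.mp hpw
    simp only [psA_rootFor] at h
    by_cases hm : psA_matches r0 p
    · rw [if_pos hm] at h
      cases h
      intro x hx hmx
      rcases List.mem_cons.mp hx with rfl | hx'
      · exact le_refl _
      · exact h0 x hx'
    · rw [if_neg hm] at h
      intro x hx hmx
      rcases List.mem_cons.mp hx with rfl | hx'
      · exact absurd hmx hm
      · exact ih hrest h x hx' hmx

theorem pairwise_getLast {α : Type} {rel : α → α → Prop} :
    ∀ {l : List α}, l.Pairwise rel → ∀ {q : α}, l.getLast? = some q →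
      ∀ y ∈ l, y = q ∨ rel y q := by
  intro l
  induction l with
  | nil => intro _ q hq; simp at hq
  | cons a l' ih =>
    intro hpw q hq y hy
    obtain ⟨h0, hrest⟩ := List.pairwise_cons.mp hpw
    cases l' with
    | nil =>
      simp at hq
      subst hq
      rcases List.mem_cons.mp hy with rfl | hy'
      · exact Or.inl rfl
      · simp at hy'
    | cons b l'' =>
      have hq' : (b :: l'').getLast? = some q := by
        rw [List.getLast?_cons_cons] at hq
        exact hq
      rcases List.mem_cons.mp hy with rfl | hy'
      · have hqmem : q ∈ b :: l'' := List.mem_of_getLast? hq'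
        exact Or.inr (h0 q hqmem)
      · exact ih hrest hq' y hy'

-- characterization of B's deepest lookup
theorem deepest_eq (R : List String) (p : String) :
    psB_deepest (psB_trie R) p =
      match ((pvPrefixes (pvSplit p.toList)).filter
          (fun q => (pvLookupM (psB_trie R) q).isSome)).getLast? with
      | some q => pvLookupM (psB_trie R) q
      | none => none := by
  unfold psB_deepest
  rw [psB_split_eq, descend_eq_fold, fold_hit_getLast]

theorem lookupM_isSome_iff (R : List String) (q : List (List Char)) :
    (pvLookupM (psB_trie R) q).isSome = true ↔ ∃ x ∈ R, pvSplit x.toList = q := by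
  rw [pvLookupM_trie, List.find?_isSome]
  constructor
  · rintro ⟨x, hx, hpx⟩
    exact ⟨x, List.mem_reverse.mp hx, of_decide_eq_true hpx⟩
  · rintro ⟨x, hx, hpx⟩
    exact ⟨x, List.mem_reverse.mpr hx, decide_eq_true hpx⟩

theorem deepest_some (R : List String) (p : String) (b : String)
    (h : psB_deepest (psB_trie R) p = some b) :
    b ∈ R ∧ pvSplit b.toList <+: pvSplit p.toList ∧
      ∀ x ∈ R, pvSplit x.toList <+: pvSplit p.toList →
        pvSplit x.toList <+: pvSplit b.toList := by
  rw [deepest_eq] at h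
  cases hl : ((pvPrefixes (pvSplit p.toList)).filter
      (fun q => (pvLookupM (psB_trie R) q).isSome)).getLast? with
  | none => rw [hl] at h; simp at h
  | some q =>
    rw [hl] at h
    have h2 : pvLookupM (psB_trie R) q = some b := h
    have hqmem : q ∈ (pvPrefixes (pvSplit p.toList)).filter
        (fun q => (pvLookupM (psB_trie R) q).isSome) := List.mem_of_getLast? hl
    obtain ⟨hqP, _⟩ := List.mem_filter.mp hqmem
    have hqpre : q <+: pvSplit p.toList := (mem_pvPrefixes.mp hqP).2
    have h : R.reverse.find? (fun r => decide (pvSplit r.toList = q)) = some b := by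
      rw [← pvLookupM_trie]; exact h2
    have hbmem : b ∈ R := List.mem_reverse.mp (List.mem_of_find?_eq_some h)
    have hbq' := List.find?_some h
    have hbq : pvSplit b.toList = q := by simpa using hbq'
    refine ⟨hbmem, hbq ▸ hqpre, ?_⟩
    intro x hx hxpre
    have hxP : pvSplit x.toList ∈ pvPrefixes (pvSplit p.toList) :=
      mem_pvPrefixes.mpr ⟨pvSplit_ne_nil _, hxpre⟩
    have hxhit : pvSplit x.toList ∈ (pvPrefixes (pvSplit p.toList)).filter
        (fun q => (pvLookupM (psB_trie R) q).isSome) := by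
      rw [List.mem_filter]
      exact ⟨hxP, by rw [lookupM_isSome_iff]; exact ⟨x, hx, rfl⟩⟩
    have hpw := (pvPrefixes_pairwise (pvSplit p.toList)).filter
      (fun q => (pvLookupM (psB_trie R) q).isSome)
    rcases pairwise_getLast hpw hl _ hxhit with heq | hrel
    · rw [heq, hbq]
    · rw [hbq]; exact hrel

theorem deepest_none (R : List String) (p : String)
    (h : psB_deepest (psB_trie R) p = none) :
    ∀ x ∈ R, ¬ pvSplit x.toList <+: pvSplit p.toList := by
  intro x hx hxpre
  rw [deepest_eq] at h
  have hxhit : pvSplit x.toList ∈ (pvPrefixes (pvSplit p.toList)).filter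
      (fun q => (pvLookupM (psB_trie R) q).isSome) := by
    rw [List.mem_filter]
    refine ⟨mem_pvPrefixes.mpr ⟨pvSplit_ne_nil _, hxpre⟩, ?_⟩
    rw [lookupM_isSome_iff]
    exact ⟨x, hx, rfl⟩
  cases hl : ((pvPrefixes (pvSplit p.toList)).filter
      (fun q => (pvLookupM (psB_trie R) q).isSome)).getLast? with
  | none =>
    rw [List.getLast?_eq_none_iff] at hl
    rw [hl] at hxhit
    simp at hxhit
  | some q =>
    rw [hl] at h
    have h2 : pvLookupM (psB_trie R) q = none := h
    have hqmem : q ∈ (pvPrefixes (pvSplit p.toList)).filter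
        (fun q => (pvLookupM (psB_trie R) q).isSome) := List.mem_of_getLast? hl
    obtain ⟨_, hqs⟩ := List.mem_filter.mp hqmem
    rw [h2] at hqs
    simp at hqs

-- ---- lookup equivalence ----
theorem lookup_eq (R : List String) (p : String) :
    psA_rootFor (PySem.List.sorted R (fun r => PySem.Str.len r) true) p =
      psB_deepest (psB_trie R) p := by
  have hpw := PySem.List.sorted_pairwise_rev R (fun r => PySem.Str.len r)
  cases hA : psA_rootFor (PySem.List.sorted R (fun r => PySem.Str.len r) true) p with
  | none =>
    cases hB : psB_deepest (psB_trie R) p with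
    | none => rfl
    | some b =>
      obtain ⟨hbR, hbpre, _⟩ := deepest_some R p b hB
      have hbRS : b ∈ PySem.List.sorted R (fun r => PySem.Str.len r) true :=
        (PySem.List.mem_sorted _ _ _ _).mpr hbR
      have := (rootFor_none _ p).mp hA b hbRS
      rw [(matches_iff b p).mpr hbpre] at this
      simp at this
  | some a =>
    obtain ⟨haRS, hamat⟩ := rootFor_mem hA
    have haR : a ∈ R := (PySem.List.mem_sorted _ _ _ _).mp haRS
    have hapre := (matches_iff a p).mp hamat
    cases hB : psB_deepest (psB_trie R) p with
    | none => exact absurd hapre (deepest_none R p hB a haR)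
    | some b =>
      obtain ⟨hbR, hbpre, hbmax⟩ := deepest_some R p b hB
      have hab : pvSplit a.toList <+: pvSplit b.toList := hbmax a haR hapre
      have hbRS : b ∈ PySem.List.sorted R (fun r => PySem.Str.len r) true :=
        (PySem.List.mem_sorted _ _ _ _).mpr hbR
      have hlen : PySem.Str.len b ≤ PySem.Str.len a :=
        rootFor_max _ p a hpw hA b hbRS ((matches_iff b p).mpr hbpre)
      have hlen' : b.toList.length ≤ a.toList.length := by
        simpa [PySem.Str.len] using hlen
      have : a.toList = b.toList := eq_of_split_prefix_len hab hlen'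
      rw [String.toList_inj.mp this]

-- ---- counting lemmas ----
theorem getD_foldl_insert_const (l : List String) (d : PySem.Dict String (PySem.Dict String Int))
    (v : PySem.Dict String Int) (k : String) (dflt : PySem.Dict String Int) :
    (l.foldl (fun d x => d.insert x v) d).getD k dflt =
      if k ∈ l then v else d.getD k dflt := by
  induction l generalizing d with
  | nil => simp
  | cons x l' ih =>
    simp only [List.foldl_cons, ih, PySem.Dict.getD_insert, List.mem_cons]
    by_cases hkl : k ∈ l'
    · simp [hkl]
    · by_cases hkx : k = x
      · simp [hkx]
      · simp [hkx, hkl]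

theorem B_fold_getD {σ : Type} (l : List σ) (pf : σ → String) (t : PTrie)
    (d : PySem.Dict String Int) (r : String) :
    (l.foldl (fun d e => psB_bump t d (pf e)) d).getD r 0 =
      d.getD r 0 + (l.countP (fun e => psB_deepest t (pf e) == some r) : Int) := by
  induction l generalizing d with
  | nil => simp
  | cons e l' ih =>
    simp only [List.foldl_cons, List.countP_cons, ih]
    unfold psB_bump
    cases hd : psB_deepest t (pf e) with
    | none => simp
    | some r0 =>
      by_cases hr : r0 = r
      · subst hr
        simp only [PySem.Dict.getD_insert, beq_iff_eq]
        push_cast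
        ring
      · simp only [PySem.Dict.getD_insert, beq_iff_eq]
        rw [if_neg (fun hcc => hr hcc.symm)]
        simp [hr]

theorem A_fold_getD {σ : Type} (l : List σ) (pf : σ → String) (field : String)
    (RS : List String) (st : PySem.Dict String (PySem.Dict String Int)) (r : String)
    (hRS : ∀ x ∈ RS, (x == "") = false) :
    ((l.foldl (fun st e => psA_bump field RS st (pf e)) st).getD r PySem.Dict.empty).getD field 0 =
      (st.getD r PySem.Dict.empty).getD field 0 +
        (l.countP (fun e => psA_rootFor RS (pf e) == some r) : Int) := by
  induction l generalizing st with
  | nil => simp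
  | cons e l' ih =>
    simp only [List.foldl_cons, List.countP_cons, ih]
    unfold psA_bump
    cases hd : psA_rootFor RS (pf e) with
    | none => simp
    | some root =>
      have hroot : (root == "") = false := hRS root (rootFor_mem hd).1
      simp only [hroot, Bool.false_eq_true, if_false, beq_iff_eq]
      by_cases hr : root = r
      · subst hr
        rw [PySem.Dict.getD_modify]
        rw [if_pos rfl, PySem.Dict.getD_modify, if_pos rfl]
        simp only [if_true]
        push_cast
        ring
      · rw [PySem.Dict.getD_modify, if_neg (fun hcc => hr hcc.symm)]
        simp [hr]

theorem A_fold_getD_other {σ : Type} (l : List σ) (pf : σ → String) (field other : String)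
    (RS : List String) (st : PySem.Dict String (PySem.Dict String Int)) (r : String)
    (hne : other ≠ field) :
    ((l.foldl (fun st e => psA_bump field RS st (pf e)) st).getD r PySem.Dict.empty).getD other 0 =
      (st.getD r PySem.Dict.empty).getD other 0 := by
  induction l generalizing st with
  | nil => simp
  | cons e l' ih =>
    simp only [List.foldl_cons, ih]
    unfold psA_bump
    cases hd : psA_rootFor RS (pf e) with
    | none => rfl
    | some root =>
      by_cases hroot : (root == "") = true
      · simp [hroot]
      · have hroot' : (root == "") = false := by simpa using hroot
        simp only [hroot', Bool.false_eq_true, if_false]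
        by_cases hr : r = root
        · subst hr
          rw [PySem.Dict.getD_modify, if_pos rfl, PySem.Dict.getD_modify,
            if_neg hne]
        · rw [PySem.Dict.getD_modify, if_neg hr]

theorem A_fold_keys {σ : Type} (l : List σ) (pf : σ → String) (field : String)
    (RS : List String) (st : PySem.Dict String (PySem.Dict String Int))
    (hmem : ∀ x ∈ RS, x ∈ st.keys) :
    (l.foldl (fun st e => psA_bump field RS st (pf e)) st).keys = st.keys := by
  induction l generalizing st with
  | nil => simp
  | cons e l' ih =>
    simp only [List.foldl_cons]
    have hstep : (psA_bump field RS st (pf e)).keys = st.keys := by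
      unfold psA_bump
      cases hd : psA_rootFor RS (pf e) with
      | none => rfl
      | some root =>
        by_cases hroot : (root == "") = true
        · simp [hroot]
        · have hroot' : (root == "") = false := by simpa using hroot
          simp only [hroot', Bool.false_eq_true, if_false]
          rw [PySem.Dict.keys_modify]
          exact PySem.Dict.keys_insert_of_contains _ _
            ((PySem.Dict.contains_iff_mem_keys _ _).mpr (hmem root (rootFor_mem hd).1))
    rw [ih _ (fun x hx => hstep ▸ hmem x hx)]
    exact hstep

-- ===== VERDICT (by name: the statement is the Claim_ definition above) =====
theorem package_stats_spec : Claim_equal_package_stats := by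
  intro files symbols packages _hdom
  unfold Spec_package_stats
  simp only [package_stats, package_stats_alt]
  have hBA : ∀ pk, psB_roots pk = psA_roots pk := fun _ => rfl
  simp only [hBA]
  by_cases hE : (psA_roots packages).isEmpty
  · simp [hE]
  · simp only [hE, Bool.false_eq_true, if_false]
    set R := psA_roots packages with hR
    set RS := PySem.List.sorted R (fun r => PySem.Str.len r) true with hRSdef
    set T := psB_trie R with hT
    have hRSne : ∀ x ∈ RS, (x == "") = false := by
      intro x hx
      have hxR : x ∈ R := (PySem.List.mem_sorted _ _ _ _).mp hx
      rw [hR] at hxR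
      simp only [psA_roots, List.mem_filter] at hxR
      simpa using hxR.2
    set stats0 := RS.foldl
      (fun d root => d.insert root (PySem.Dict.mk [("files", (0 : Int)), ("symbols", (0 : Int))]))
      PySem.Dict.empty with hs0
    set stats1 := files.foldl
      (fun st e => psA_bump "files" RS st ((PySem.Dict.mk e.2).getD "path" "")) stats0 with hs1
    set stats2 := symbols.foldl
      (fun st e => psA_bump "symbols" RS st
        ((PySem.Dict.mk ((PySem.Dict.mk e.2).getD "defined_in" [])).getD "path" "")) stats1 with hs2
    have hkeys0 : stats0.keys = PySem.Set.ofList RS := by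
      rw [hs0, PySem.Dict.keys_foldl_insert]
      rw [PySem.Dict.keys_empty]
      rfl
    have hmem0 : ∀ x ∈ RS, x ∈ stats0.keys := by
      intro x hx
      rw [hkeys0]
      exact (PySem.Set.mem_ofList _ _).mpr hx
    have hkeys1 : stats1.keys = stats0.keys := by
      rw [hs1]
      exact A_fold_keys files _ "files" RS stats0 hmem0
    have hmem1 : ∀ x ∈ RS, x ∈ stats1.keys := fun x hx => hkeys1 ▸ hmem0 x hx
    have hkeys2 : stats2.keys = stats1.keys := by
      rw [hs2]
      exact A_fold_keys symbols _ "symbols" RS stats1 hmem1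
    have hnodup2 : stats2.keys.Nodup := by
      rw [hkeys2, hkeys1, hkeys0]
      exact PySem.Set.nodup_ofList _
    have hitems : stats2.items =
        (PySem.Set.ofList RS).map (fun r => (r, stats2.getD r PySem.Dict.empty)) := by
      rw [PySem.Dict.items_eq_map_keys stats2 hnodup2 PySem.Dict.empty, hkeys2, hkeys1, hkeys0]
    have hAlist : stats2.items.map (fun p => (p.1, p.2.getD "files" 0, p.2.getD "symbols" 0)) =
        (PySem.Set.ofList RS).map (fun r => (r,
          (files.countP (fun e =>
            psA_rootFor RS ((PySem.Dict.mk e.2).getD "path" "") == some r) : Int),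
          (symbols.countP (fun e =>
            psA_rootFor RS ((PySem.Dict.mk ((PySem.Dict.mk e.2).getD "defined_in" [])).getD "path" "")
              == some r) : Int))) := by
      rw [hitems, List.map_map]
      apply List.map_congr_left
      intro r hrRS'
      have hrRS : r ∈ RS := (PySem.Set.mem_ofList _ _).mp hrRS'
      have hF : (stats2.getD r PySem.Dict.empty).getD "files" 0 =
          (files.countP (fun e =>
            psA_rootFor RS ((PySem.Dict.mk e.2).getD "path" "") == some r) : Int) := by
        rw [hs2, A_fold_getD_other symbols _ "symbols" "files" RS stats1 r (by decide)]
        rw [hs1, A_fold_getD files _ "files" RS stats0 r hRSne]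
        rw [hs0, getD_foldl_insert_const RS PySem.Dict.empty _ r PySem.Dict.empty, if_pos hrRS]
        norm_num
        decide
      have hS : (stats2.getD r PySem.Dict.empty).getD "symbols" 0 =
          (symbols.countP (fun e =>
            psA_rootFor RS ((PySem.Dict.mk ((PySem.Dict.mk e.2).getD "defined_in" [])).getD "path" "")
              == some r) : Int) := by
        rw [hs2, A_fold_getD symbols _ "symbols" RS stats1 r hRSne]
        rw [hs1, A_fold_getD_other files _ "files" "symbols" RS stats0 r (by decide)]
        rw [hs0, getD_foldl_insert_const RS PySem.Dict.empty _ r PySem.Dict.empty, if_pos hrRS]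
        norm_num
        decide
      simp only [Function.comp, hF, hS]
    have hlookup : ∀ x, psB_deepest T x = psA_rootFor RS x := fun x => (lookup_eq R x).symm
    set fcnt := files.foldl
      (fun d e => psB_bump T d ((PySem.Dict.mk e.2).getD "path" "")) PySem.Dict.empty with hfc
    set scnt := symbols.foldl
      (fun d e => psB_bump T d
        ((PySem.Dict.mk ((PySem.Dict.mk e.2).getD "defined_in" [])).getD "path" ""))
      PySem.Dict.empty with hsc
    have hBlist : (PySem.List.dedup R).map (fun r => (r, fcnt.getD r 0, scnt.getD r 0)) =
        (PySem.Set.ofList R).map (fun r => (r,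
          (files.countP (fun e =>
            psA_rootFor RS ((PySem.Dict.mk e.2).getD "path" "") == some r) : Int),
          (symbols.countP (fun e =>
            psA_rootFor RS ((PySem.Dict.mk ((PySem.Dict.mk e.2).getD "defined_in" [])).getD "path" "")
              == some r) : Int))) := by
      rw [PySem.List.dedup_eq_ofList]
      apply List.map_congr_left
      intro r _hr
      have h1 : fcnt.getD r 0 = (files.countP (fun e =>
          psA_rootFor RS ((PySem.Dict.mk e.2).getD "path" "") == some r) : Int) := by
        rw [hfc, B_fold_getD files _ T PySem.Dict.empty r]
        simp only [PySem.Dict.getD_empty, zero_add, hlookup]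
      have h2 : scnt.getD r 0 = (symbols.countP (fun e =>
          psA_rootFor RS ((PySem.Dict.mk ((PySem.Dict.mk e.2).getD "defined_in" [])).getD "path" "")
            == some r) : Int) := by
        rw [hsc, B_fold_getD symbols _ T PySem.Dict.empty r]
        simp only [PySem.Dict.getD_empty, zero_add, hlookup]
      rw [h1, h2]
    rw [hAlist, hBlist]
    have hinj : Function.Injective
        (fun t : String × Int × Int => toLex (-t.2.1, toLex (-t.2.2, t.1))) := by
      intro x y h
      obtain ⟨s1, f1, y1⟩ := x
      obtain ⟨s2, f2, y2⟩ := y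
      simp only [toLex_inj, Prod.mk.injEq, neg_inj] at h
      obtain ⟨hf, hy, hs⟩ := h
      simp [hf, hy, hs]
    have hperm : ((PySem.Set.ofList RS).Perm (PySem.Set.ofList R)) := by
      rw [List.perm_ext_iff_of_nodup (PySem.Set.nodup_ofList _) (PySem.Set.nodup_ofList _)]
      intro a
      rw [PySem.Set.mem_ofList, PySem.Set.mem_ofList, PySem.List.mem_sorted]
    exact PySem.List.sorted_eq_sorted_of_perm _ _ _ hinj (hperm.map _)
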